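-- pv_equiv track=rewrite | github.com/ericccarlson0/basic-document-nlp | error_correction/char_confusion_gen.py | get_char_diffs
-- ===== SOURCE A (Python) =====
-- def char_counts(word):
--     charCounts = {}
--     for ch in word:
--         if ch not in charCounts:
--             charCounts[ch] = 0
--         charCounts[ch] += 1
--
--     return charCounts
--
-- def get_char_diffs(word1, word2):
--     charCounts1 = char_counts(word1)
--     charCounts2 = char_counts(word2)
--
--     charCountDiffs = {}
--     allChars = set(charCounts1.keys())
--     allChars.update(charCounts2.keys())
--     for c in allChars:
--         count1 = charCounts1.pop(c, 0)
--         count2 = charCounts2.pop(c, 0)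
--         if count1 != count2:
--             charCountDiffs[c] = count1 - count2
--
--     return charCountDiffs
-- ===== SOURCE B (Python) =====
-- def get_char_diffs(word1, word2):
--     diff = {}
--     for ch in word1:
--         diff[ch] = diff.get(ch, 0) + 1
--     for ch in word2:
--         diff[ch] = diff.get(ch, 0) - 1
--     return {c: v for c, v in diff.items() if v != 0}
-- ===== Notes on version B (the rewrite author's own statement) =====
-- stated objective: simpler
-- what changed: One signed-difference dict accumulated by +1 over word1 and -1 over word2, then filtered to nonzero entries, replacing A's two count dicts plus a union set with pop-and-compare per key.
import Mathlib
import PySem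

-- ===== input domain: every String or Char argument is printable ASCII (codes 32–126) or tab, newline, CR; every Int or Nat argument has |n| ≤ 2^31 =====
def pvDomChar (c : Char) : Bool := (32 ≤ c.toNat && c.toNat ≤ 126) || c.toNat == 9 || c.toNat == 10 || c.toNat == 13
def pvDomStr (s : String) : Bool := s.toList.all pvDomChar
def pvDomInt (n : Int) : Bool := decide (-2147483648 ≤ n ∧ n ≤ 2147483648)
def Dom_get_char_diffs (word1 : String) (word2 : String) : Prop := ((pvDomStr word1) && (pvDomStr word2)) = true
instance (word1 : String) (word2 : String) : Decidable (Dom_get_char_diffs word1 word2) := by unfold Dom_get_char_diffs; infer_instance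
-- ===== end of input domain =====

-- B: one signed-difference dict (+1 over word1, -1 over word2) filtered to nonzero,
-- instead of A's two count dicts plus a union set with pop-and-compare; same cost, simpler.

-- ===== PORT A =====
def char_counts (word : String) : PySem.Dict String Int :=
  word.toList.foldl (fun charCounts ch =>
    let k := String.ofList [ch]
    let charCounts := if charCounts.contains k then charCounts else charCounts.insert k 0
    charCounts.insert k (charCounts.getD k 0 + 1)) PySem.Dict.empty

def get_char_diffs (word1 : String) (word2 : String) : List (String × Int) :=
  let charCounts1 := char_counts word1
  let charCounts2 := char_counts word2
  let allChars : PySem.Set String :=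
    PySem.Set.update (PySem.Set.ofList (PySem.Dict.keys charCounts1)) (PySem.Dict.keys charCounts2)
  -- iteration over the Python set: PySem.Set insertion order (Python's hash order is not modelled;
  -- the returned dict is compared ignoring order)
  let st := allChars.foldl (fun (st : PySem.Dict String Int × PySem.Dict String Int × PySem.Dict String Int) c =>
    let (cc1, cc2, charCountDiffs) := st
    -- pop(c, 0): read with default, then remove the key
    let count1 := cc1.getD c 0
    let cc1 := cc1.erase c
    let count2 := cc2.getD c 0
    let cc2 := cc2.erase c
    let charCountDiffs := if count1 ≠ count2 then charCountDiffs.insert c (count1 - count2) else charCountDiffs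
    (cc1, cc2, charCountDiffs)) (charCounts1, charCounts2, PySem.Dict.empty)
  (st.2.2).items

-- ===== PORT B =====
def get_char_diffs_alt (word1 : String) (word2 : String) : List (String × Int) :=
  let diff := word1.toList.foldl (fun diff ch =>
    let k := String.ofList [ch]
    diff.insert k (diff.getD k 0 + 1)) PySem.Dict.empty
  let diff := word2.toList.foldl (fun diff ch =>
    let k := String.ofList [ch]
    diff.insert k (diff.getD k 0 - 1)) diff
  diff.items.filter (fun p => p.2 != 0)

-- ===== PRECONDITION & SPEC =====
def Spec_get_char_diffs (word1 : String) (word2 : String) (out : List (String × Int)) : Prop := out = get_char_diffs_alt word1 word2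
instance (word1 : String) (word2 : String) (out : List (String × Int)) : Decidable (Spec_get_char_diffs word1 word2 out) := by unfold Spec_get_char_diffs; infer_instance

-- ===== CLAIM (what is proved, stated in full; the proofs are below) =====
def Claim_equal_get_char_diffs : Prop := ∀ (word1 : String) (word2 : String), Dom_get_char_diffs word1 word2 → Spec_get_char_diffs word1 word2 (get_char_diffs word1 word2)

-- ===== LEMMAS AND PROOFS =====

-- the key function: a Python character is a one-character string
def pvKey (ch : Char) : String := String.ofList [ch]

-- A's conditional-initialise-then-increment body is one counting insert
theorem char_counts_step (d : PySem.Dict String Int) (k : String) :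
    (let d' := if d.contains k then d else d.insert k 0
     d'.insert k (d'.getD k 0 + 1)) = d.insert k (d.getD k 0 + 1) := by
  cases h : d.contains k with
  | true => simp
  | false =>
    simp only [Bool.false_eq_true, if_false]
    rw [PySem.Dict.getD_insert_self, PySem.Dict.insert_insert_self,
        PySem.Dict.getD_of_not_contains d 0 h]

theorem char_counts_eq (word : String) :
    char_counts word = PySem.Dict.counter (word.toList.map pvKey) := by
  unfold char_counts
  rw [← PySem.Dict.foldl_insert_getD_add_one_eq_counter, List.foldl_map]
  have : (fun (d : PySem.Dict String Int) (ch : Char) =>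
      let k := String.ofList [ch]
      let d' := if d.contains k then d else d.insert k 0
      d'.insert k (d'.getD k 0 + 1))
      = fun d ch => d.insert (pvKey ch) (d.getD (pvKey ch) 0 + 1) := by
    funext d ch
    exact char_counts_step d (pvKey ch)
  rw [this]

-- decrement loop counts subtractively
theorem getD_foldl_insert_sub_one (l : List String) (d : PySem.Dict String Int) (v : String) :
    (l.foldl (fun d x => d.insert x (d.getD x 0 - 1)) d).getD v 0 = d.getD v 0 - l.count v := by
  induction l generalizing d with
  | nil => simp
  | cons a l ih =>
    simp only [List.foldl_cons, ih, PySem.Dict.getD_insert, List.count_cons]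
    by_cases h : v = a
    · simp only [h, beq_self_eq_true, if_true]
      omega
    · have h2 : (a == v) = false := by simpa using fun hh : a = v => h hh.symm
      simp [if_neg h, h2]

-- erase only affects the erased key
theorem getD_erase_of_ne (d : PySem.Dict String Int) (k k' : String) (h : k' ≠ k) :
    (d.erase k).getD k' 0 = d.getD k' 0 := by
  simp only [PySem.Dict.getD_eq_get?_getD, PySem.Dict.get?, PySem.Dict.erase, List.find?_filter]
  rw [show (fun (a : String × Int) => decide ((!a.1 == k) = true ∧ (a.1 == k') = true))
      = (fun p => p.1 == k') from
    funext fun a => by by_cases ha : a.1 = k' <;> simp [ha, h]]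

-- membership in an updated set
theorem mem_set_update (t : List String) (s : PySem.Set String) (a : String) :
    a ∈ PySem.Set.update s t ↔ a ∈ s ∨ a ∈ t := by
  induction t generalizing s with
  | nil => simp [PySem.Set.update]
  | cons b t ih =>
    show a ∈ PySem.Set.update (PySem.Set.add s b) t ↔ _
    rw [ih, PySem.Set.mem_add]
    simp [or_assoc, or_comm (a := a = b)]

theorem set_update_add (s t : PySem.Set String) (a : String) :
    PySem.Set.update s (PySem.Set.add t a) = PySem.Set.add (PySem.Set.update s t) a := by
  by_cases h : t.contains a = true
  · have ha : a ∈ t := List.mem_of_elem_eq_true h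
    rw [show PySem.Set.add t a = t from by simp [PySem.Set.add, PySem.Set.contains, ha]]
    have hmem : a ∈ PySem.Set.update s t := (mem_set_update t s a).2 (Or.inr ha)
    rw [show PySem.Set.add (PySem.Set.update s t) a = PySem.Set.update s t from by
      simp [PySem.Set.add, PySem.Set.contains, ha]]
  · have ha : a ∉ t := fun m => h (List.elem_eq_true_of_mem m)
    rw [show PySem.Set.add t a = t ++ [a] from by simp [PySem.Set.add, PySem.Set.contains, ha]]
    show PySem.Set.update s (t ++ [a]) = _
    simp [PySem.Set.update, List.foldl_append, PySem.Set.add]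

-- updating with a set built from l is updating with l itself
theorem set_update_foldl_add (l : List String) (s t : PySem.Set String) :
    PySem.Set.update s (List.foldl PySem.Set.add t l) = PySem.Set.update (PySem.Set.update s t) l := by
  induction l generalizing t with
  | nil => rfl
  | cons a l ih =>
    show PySem.Set.update s (List.foldl PySem.Set.add (PySem.Set.add t a) l) = _
    rw [ih, set_update_add]
    rfl

theorem set_update_ofList (l : List String) (s : PySem.Set String) :
    PySem.Set.update s (PySem.Set.ofList l) = PySem.Set.update s l :=
  set_update_foldl_add l s []

theorem set_ofList_ofList (l : List String) :
    PySem.Set.ofList (PySem.Set.ofList l) = PySem.Set.ofList l :=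
  set_update_ofList l []

-- A's union-loop, characterised: with distinct keys the pops never affect later reads
theorem loopA_items (L : List String) (hL : L.Nodup)
    (d1 d2 acc : PySem.Dict String Int)
    (hacc : ∀ c ∈ L, acc.contains c = false) (hnd : acc.keys.Nodup) :
    ((L.foldl (fun (st : PySem.Dict String Int × PySem.Dict String Int × PySem.Dict String Int) c =>
        let (cc1, cc2, charCountDiffs) := st
        let count1 := cc1.getD c 0
        let cc1' := cc1.erase c
        let count2 := cc2.getD c 0
        let cc2' := cc2.erase c
        let charCountDiffs' := if count1 ≠ count2 then charCountDiffs.insert c (count1 - count2) else charCountDiffs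
        (cc1', cc2', charCountDiffs')) (d1, d2, acc)).2.2).items
    = acc.items ++ L.filterMap (fun c =>
        if d1.getD c 0 ≠ d2.getD c 0 then some (c, d1.getD c 0 - d2.getD c 0) else none) := by
  induction L generalizing d1 d2 acc with
  | nil => simp
  | cons c L ih =>
    have hcL : c ∉ L := (List.nodup_cons.mp hL).1
    have hLnd : L.Nodup := (List.nodup_cons.mp hL).2
    simp only [List.foldl_cons]
    by_cases hcond : d1.getD c 0 ≠ d2.getD c 0
    · rw [if_pos hcond]
      rw [ih hLnd (d1.erase c) (d2.erase c) (acc.insert c (d1.getD c 0 - d2.getD c 0))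
        (fun c' hc' => by
          rw [PySem.Dict.contains_insert]
          have : c' ≠ c := fun h => hcL (h ▸ hc')
          simp [this, hacc c' (List.mem_cons_of_mem _ hc')])
        (PySem.Dict.nodup_keys_insert acc c _ hnd)]
      rw [PySem.Dict.items_insert_of_not_contains acc _ (hacc c (List.mem_cons_self))]
      rw [List.filterMap_cons, if_pos hcond]
      rw [List.filterMap_congr (fun c' hc' => by
        have hne : c' ≠ c := fun h => hcL (h ▸ hc')
        rw [getD_erase_of_ne d1 c c' hne, getD_erase_of_ne d2 c c' hne])]
      simp
    · rw [if_neg hcond]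
      rw [ih hLnd (d1.erase c) (d2.erase c) acc
        (fun c' hc' => hacc c' (List.mem_cons_of_mem _ hc')) hnd]
      rw [List.filterMap_cons, if_neg hcond]
      rw [List.filterMap_congr (fun c' hc' => by
        have hne : c' ≠ c := fun h => hcL (h ▸ hc')
        rw [getD_erase_of_ne d1 c c' hne, getD_erase_of_ne d2 c c' hne])]

-- filtered signed differences = filterMap of the per-key comparison
theorem final_shape (K : List String) (a b : String → Int) :
    K.filterMap (fun c => if a c ≠ b c then some (c, a c - b c) else none)
    = (K.map (fun c => (c, a c - b c))).filter (fun p => p.2 != 0) := by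
  induction K with
  | nil => simp
  | cons c K ih =>
    rw [List.filterMap_cons, List.map_cons, List.filter_cons, ih]
    by_cases h : a c = b c
    · simp [h]
    · have h2 : a c - b c ≠ 0 := sub_ne_zero.mpr h
      simp [h, h2]

theorem get_char_diffs_spec' : ∀ (word1 word2 : String),
    get_char_diffs word1 word2 = get_char_diffs_alt word1 word2 := by
  intro word1 word2
  have hA : get_char_diffs word1 word2 =
      (PySem.Set.update (PySem.Set.ofList ((PySem.Dict.counter (word1.toList.map pvKey)).keys))
          ((PySem.Dict.counter (word2.toList.map pvKey)).keys)).filterMap (fun c =>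
        if (PySem.Dict.counter (word1.toList.map pvKey)).getD c 0 ≠ (PySem.Dict.counter (word2.toList.map pvKey)).getD c 0
        then some (c, (PySem.Dict.counter (word1.toList.map pvKey)).getD c 0
            - (PySem.Dict.counter (word2.toList.map pvKey)).getD c 0) else none) := by
    unfold get_char_diffs
    rw [char_counts_eq word1, char_counts_eq word2]
    rw [loopA_items _
      (by rw [PySem.Dict.keys_counter, PySem.Dict.keys_counter]
          exact PySem.Set.nodup_update _ _ (PySem.Set.nodup_ofList _))
      _ _ _ (fun c _ => PySem.Dict.contains_empty c) PySem.Dict.nodup_keys_empty]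
    rw [PySem.Dict.keys_counter, PySem.Dict.keys_counter]
    simp [set_update_ofList, PySem.Dict.empty]
  have hB : get_char_diffs_alt word1 word2 =
      ((PySem.Set.update (PySem.Set.ofList (word1.toList.map pvKey)) (word2.toList.map pvKey)).map
        (fun c => (c, ((word1.toList.map pvKey).count c : Int) - ((word2.toList.map pvKey).count c : Int)))).filter
        (fun p => p.2 != 0) := by
    unfold get_char_diffs_alt
    have e1 : word1.toList.foldl
          (fun (d : PySem.Dict String Int) ch => d.insert (pvKey ch) (d.getD (pvKey ch) 0 + 1)) PySem.Dict.empty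
        = (word1.toList.map pvKey).foldl (fun d x => d.insert x (d.getD x 0 + 1)) PySem.Dict.empty :=
      (List.foldl_map (f := pvKey) (g := fun (d : PySem.Dict String Int) x => d.insert x (d.getD x 0 + 1))
        (l := word1.toList) (init := PySem.Dict.empty)).symm
    have e2 : ∀ d0 : PySem.Dict String Int, word2.toList.foldl
          (fun d ch => d.insert (pvKey ch) (d.getD (pvKey ch) 0 - 1)) d0
        = (word2.toList.map pvKey).foldl (fun d x => d.insert x (d.getD x 0 - 1)) d0 :=
      fun d0 => (List.foldl_map (f := pvKey) (g := fun (d : PySem.Dict String Int) x => d.insert x (d.getD x 0 - 1))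
        (l := word2.toList) (init := d0)).symm
    show List.filter (fun p => p.2 != 0)
        ((word2.toList.foldl (fun (d : PySem.Dict String Int) ch => d.insert (pvKey ch) (d.getD (pvKey ch) 0 - 1))
          (word1.toList.foldl (fun d ch => d.insert (pvKey ch) (d.getD (pvKey ch) 0 + 1)) PySem.Dict.empty)).items) = _
    rw [e1, e2]
    set l1 := word1.toList.map pvKey
    set l2 := word2.toList.map pvKey
    set diffB : PySem.Dict String Int := l2.foldl (fun d x => d.insert x (d.getD x 0 - 1))
      (l1.foldl (fun d x => d.insert x (d.getD x 0 + 1)) PySem.Dict.empty) with hdiff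
    have hkeys : diffB.keys = PySem.Set.update (PySem.Set.ofList l1) l2 := by
      rw [hdiff]
      rw [show (fun (d : PySem.Dict String Int) (x : String) => d.insert x (d.getD x 0 - 1))
          = (fun d x => d.insert (id x) ((fun (d : PySem.Dict String Int) (x : String) => d.getD x 0 - 1) d x)) from rfl]
      rw [PySem.Dict.keys_foldl_insert_key]
      rw [show (fun (d : PySem.Dict String Int) (x : String) => d.insert x (d.getD x 0 + 1))
          = (fun d x => d.insert (id x) ((fun (d : PySem.Dict String Int) (x : String) => d.getD x 0 + 1) d x)) from rfl]
      rw [PySem.Dict.keys_foldl_insert_key]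
      simp only [PySem.Dict.keys_empty, List.map_id]
      rfl
    have hnd : diffB.keys.Nodup := by
      rw [hkeys]
      exact PySem.Set.nodup_update _ _ (PySem.Set.nodup_ofList _)
    have hval : ∀ c, diffB.getD c 0 = ((l1.count c : Int) - (l2.count c : Int)) := by
      intro c
      rw [hdiff, getD_foldl_insert_sub_one, PySem.Dict.getD_foldl_insert_add_one,
        PySem.Dict.getD_empty]
      omega
    rw [PySem.Dict.items_eq_map_keys diffB hnd 0, hkeys]
    congr 1
    exact List.map_congr_left (fun c _ => by rw [hval c])
  rw [hA, hB]
  rw [PySem.Dict.keys_counter, PySem.Dict.keys_counter, set_ofList_ofList, set_update_ofList]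
  rw [show (fun c =>
        if (PySem.Dict.counter (word1.toList.map pvKey)).getD c 0 ≠ (PySem.Dict.counter (word2.toList.map pvKey)).getD c 0
        then some (c, (PySem.Dict.counter (word1.toList.map pvKey)).getD c 0
            - (PySem.Dict.counter (word2.toList.map pvKey)).getD c 0) else none)
      = (fun c => if (((word1.toList.map pvKey).count c : Int)) ≠ (((word2.toList.map pvKey).count c : Int))
        then some (c, (((word1.toList.map pvKey).count c : Int)) - (((word2.toList.map pvKey).count c : Int))) else none) from
    funext fun c => by rw [PySem.Dict.getD_counter, PySem.Dict.getD_counter]]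
  exact final_shape _ _ _

-- ===== VERDICT (by name: the statement is the Claim_ definition above) =====
theorem get_char_diffs_spec : Claim_equal_get_char_diffs := by
  intro w1 w2 _
  show _ = _
  exact get_char_diffs_spec' w1 w2
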